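-- pv_equiv track=rewrite | github.com/oryden/small_code_challanges | project_euler/project_euler_problem_79.py | find_unique_numbers
-- ===== SOURCE A (Python) =====
-- def find_unique_numbers(sign_ins):
--     numbers_list = []
--     for number in range(0, 10):
--         for sign_in in sign_ins:
--             if sign_in.find(str(number)) >= 0:
--                 numbers_list.append(number)
--                 break
--     return numbers_list
-- ===== SOURCE B (Python) =====
-- def find_unique_numbers(sign_ins):
--     seen = set()
--     for s in sign_ins:
--         seen.update(s)
--     return [n for n in range(10) if str(n) in seen]
-- ===== Notes on version B (the rewrite author's own statement) =====
-- stated objective: simpler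
-- what changed: B makes one pass over all sign-ins accumulating their characters into a set, then filters range(10) by set membership, replacing A's per-digit rescans of the whole list (with break) by an index-build-then-filter shape.
import Mathlib
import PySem

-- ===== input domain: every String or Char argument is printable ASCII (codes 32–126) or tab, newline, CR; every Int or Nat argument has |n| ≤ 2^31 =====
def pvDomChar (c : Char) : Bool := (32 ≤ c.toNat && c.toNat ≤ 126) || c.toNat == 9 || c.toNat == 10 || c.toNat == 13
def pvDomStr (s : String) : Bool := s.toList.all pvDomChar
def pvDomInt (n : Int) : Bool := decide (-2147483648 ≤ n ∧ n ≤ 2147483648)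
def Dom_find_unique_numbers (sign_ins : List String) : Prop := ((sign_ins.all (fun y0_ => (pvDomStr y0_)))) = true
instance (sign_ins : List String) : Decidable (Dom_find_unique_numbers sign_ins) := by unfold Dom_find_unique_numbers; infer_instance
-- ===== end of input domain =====

-- B replaces A's per-digit rescans of sign_ins (with break) by one pass building a character set,
-- then a single filter of range(10); objective: simpler.


-- ===== PORT A =====
-- inner 'for sign_in in sign_ins: if sign_in.find(str(number)) >= 0: append; break'
def findA_inner (number : Int) : List String → List Int
  | [] => []
  | s :: rest =>
      if 0 ≤ PySem.Str.find s (PySem.Int.toStr number) then [number]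
      else findA_inner number rest

def find_unique_numbers (sign_ins : List String) : List Int :=
  (PySem.List.pyRange 0 10 1).foldl (fun numbers_list number => numbers_list ++ findA_inner number sign_ins) []

-- ===== PORT B =====
-- seen is Python's set of (1-character) strings, modelled as PySem.Set Char; 'str(n) in seen'
-- is membership of str(n)'s single character, written as .all over str(n)'s characters.
def find_unique_numbers_alt (sign_ins : List String) : List Int :=
  let seen : PySem.Set Char :=
    sign_ins.foldl (fun s t => PySem.Set.update s t.toList) PySem.Set.empty
  (PySem.List.pyRange 0 10 1).filter (fun n => (PySem.Int.toChars n).all (fun c => PySem.Set.contains seen c))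

-- ===== PRECONDITION & SPEC =====
def Spec_find_unique_numbers (sign_ins : List String) (out : List Int) : Prop := out = find_unique_numbers_alt sign_ins
instance (sign_ins : List String) (out : List Int) : Decidable (Spec_find_unique_numbers sign_ins out) := by unfold Spec_find_unique_numbers; infer_instance

-- ===== CLAIM (what is proved, stated in full; the proofs are below) =====
def Claim_equal_find_unique_numbers : Prop := ∀ (sign_ins : List String), Dom_find_unique_numbers sign_ins → Spec_find_unique_numbers sign_ins (find_unique_numbers sign_ins)

-- ===== LEMMAS AND PROOFS =====

-- A's inner loop finds a digit character c (str(number) = [c]) iff some string contains c.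
theorem findA_inner_eq (n : Int) (c : Char) (h : PySem.Int.toChars n = [c]) :
    ∀ (sign_ins : List String),
      findA_inner n sign_ins = if sign_ins.any (fun s => s.toList.contains c) then [n] else [] := by
  intro sign_ins
  induction sign_ins with
  | nil => simp [findA_inner]
  | cons s rest ih =>
      have hfind : (0 ≤ PySem.Str.find s (PySem.Int.toStr n)) ↔ c ∈ s.toList := by
        rw [PySem.Str.find_nonneg_iff]
        rw [PySem.Int.toList_toStr, h]
        constructor
        · intro hinf; exact hinf.mem (by simp)
        · intro hm
          obtain ⟨l1, l2, hl⟩ := List.append_of_mem hm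
          exact ⟨l1, l2, by simp [hl]⟩
      simp only [findA_inner]
      by_cases hc : c ∈ s.toList
      · rw [if_pos (hfind.mpr hc)]
        simp [hc]
      · rw [if_neg (fun hh => hc (hfind.mp hh)), ih]
        simp [hc]

-- membership in the accumulated character set = some string contains the character
theorem seen_contains (sign_ins : List String) (c : Char) :
    ∀ (init : PySem.Set Char),
      PySem.Set.contains (sign_ins.foldl (fun s t => PySem.Set.update s t.toList) init) c
        = (init.contains c || sign_ins.any (fun s => s.toList.contains c)) := by
  induction sign_ins with
  | nil => simp
  | cons t rest ih =>
      intro init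
      simp only [List.foldl_cons, ih, List.any_cons]
      have hu : (PySem.Set.update init t.toList).contains c
           = (init.contains c || t.toList.contains c) := by
        rw [Bool.eq_iff_iff]
        simp [PySem.Set.mem_update init t.toList c]
      rw [hu, Bool.or_assoc]

theorem per_digit (sign_ins : List String) (n : Int) (c : Char) (h : PySem.Int.toChars n = [c]) :
    findA_inner n sign_ins
      = if ((PySem.Int.toChars n).all (fun d =>
            PySem.Set.contains (sign_ins.foldl (fun s t => PySem.Set.update s t.toList) PySem.Set.empty) d))
        then [n] else [] := by
  rw [findA_inner_eq n c h, h]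
  simp only [List.all_cons, List.all_nil, Bool.and_true]
  rw [seen_contains sign_ins c PySem.Set.empty]
  simp [PySem.Set.empty]

-- ===== VERDICT (by name: the statement is the Claim_ definition above) =====
theorem find_unique_numbers_spec : Claim_equal_find_unique_numbers := by
  intro sign_ins _
  unfold Spec_find_unique_numbers find_unique_numbers find_unique_numbers_alt
  have hstep : ∀ (acc : List Int) (n : Int), n ∈ PySem.List.pyRange 0 10 1 →
      acc ++ findA_inner n sign_ins
        = if ((PySem.Int.toChars n).all (fun d =>
              PySem.Set.contains (sign_ins.foldl (fun s t => PySem.Set.update s t.toList) PySem.Set.empty) d))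
          then acc ++ [n] else acc := by
    intro acc n hn
    obtain ⟨h1, h2⟩ := (PySem.List.mem_pyRange_one).mp hn
    interval_cases n
    · rw [per_digit sign_ins 0 '0' (by decide)]; split <;> simp
    · rw [per_digit sign_ins 1 '1' (by decide)]; split <;> simp
    · rw [per_digit sign_ins 2 '2' (by decide)]; split <;> simp
    · rw [per_digit sign_ins 3 '3' (by decide)]; split <;> simp
    · rw [per_digit sign_ins 4 '4' (by decide)]; split <;> simp
    · rw [per_digit sign_ins 5 '5' (by decide)]; split <;> simp
    · rw [per_digit sign_ins 6 '6' (by decide)]; split <;> simp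
    · rw [per_digit sign_ins 7 '7' (by decide)]; split <;> simp
    · rw [per_digit sign_ins 8 '8' (by decide)]; split <;> simp
    · rw [per_digit sign_ins 9 '9' (by decide)]; split <;> simp
  refine (PySem.List.foldl_congr_mem _ _ _ _ hstep).trans ?_
  rw [PySem.List.foldl_append_if_eq_filter]
  simp
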